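-- pv_equiv track=rewrite | github.com/ilias04ahmed/MH_Practica2 | funcionObjetivo.py | penalizacion_consecutivos
-- ===== SOURCE A (Python) =====
-- def penalizacion_consecutivos(sol, mapa_estudiantes):
--     p = 0
--     for s in mapa_estudiantes:
--         exams = mapa_estudiantes[s]
--         slots = []
--         for e in exams:
--             if e in sol:
--                 slots.append(sol[e][0])
--         slots.sort()
--         for i in range(len(slots) - 1):
--             if slots[i + 1] == slots[i] + 1:
--                 p += 1
--     return p
-- ===== SOURCE B (Python) =====
-- def penalizacion_consecutivos(sol, mapa_estudiantes):
--     total = 0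
--     for s in mapa_estudiantes:
--         exams = mapa_estudiantes[s]
--         st = {sol[e][0] for e in exams if e in sol}
--         total += sum(1 for v in st if v + 1 in st)
--     return total
-- ===== Notes on version B (the rewrite author's own statement) =====
-- stated objective: simpler
-- what changed: Per student, B builds a set of the slots and counts distinct slot values v with v+1 also in the set, replacing A's sort plus adjacent-index scan.
import Mathlib
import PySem

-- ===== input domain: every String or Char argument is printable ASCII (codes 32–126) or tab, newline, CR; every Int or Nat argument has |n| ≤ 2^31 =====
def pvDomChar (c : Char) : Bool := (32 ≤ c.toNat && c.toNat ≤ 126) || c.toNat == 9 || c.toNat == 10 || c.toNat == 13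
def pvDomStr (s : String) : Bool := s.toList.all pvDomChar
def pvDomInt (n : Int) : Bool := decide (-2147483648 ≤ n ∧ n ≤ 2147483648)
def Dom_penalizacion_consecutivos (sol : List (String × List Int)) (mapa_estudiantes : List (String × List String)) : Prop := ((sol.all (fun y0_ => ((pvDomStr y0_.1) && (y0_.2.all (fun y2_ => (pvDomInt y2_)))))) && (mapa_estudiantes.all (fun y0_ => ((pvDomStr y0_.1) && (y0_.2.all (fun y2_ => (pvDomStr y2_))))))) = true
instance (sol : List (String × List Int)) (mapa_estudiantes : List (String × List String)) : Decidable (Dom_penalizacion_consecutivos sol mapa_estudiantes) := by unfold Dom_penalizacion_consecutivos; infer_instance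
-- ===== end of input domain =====

-- B replaces per-student sort + adjacent-index scan by a set of slots and membership tests
-- (count distinct v with v+1 also present); objective: simpler.

-- ===== PORT A =====
-- sol[e][0] (lookup = first match; the index 0 raises on an empty slot list — excluded by Pre_)
def pvSlot (sol : List (String × List Int)) (e : String) : Int :=
  (PySem.List.pyGet? ((List.lookup e sol).getD []) 0).getD 0

def penalizacion_consecutivos (sol : List (String × List Int)) (mapa_estudiantes : List (String × List String)) : Int :=
  mapa_estudiantes.foldl (fun p sp =>
    let exams := (List.lookup sp.1 mapa_estudiantes).getD []
    let slots := exams.foldl (fun slots e =>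
      if (List.lookup e sol).isSome then slots ++ [pvSlot sol e] else slots) []
    let slotsS := PySem.List.sorted slots (fun x => x) false
    (PySem.List.pyRange 0 ((slotsS.length : Int) - 1) 1).foldl (fun p i =>
      if (PySem.List.pyGet? slotsS (i + 1)).getD 0 = (PySem.List.pyGet? slotsS i).getD 0 + 1
      then p + 1 else p) p) 0

-- ===== PORT B =====
def penalizacion_consecutivos_alt (sol : List (String × List Int)) (mapa_estudiantes : List (String × List String)) : Int :=
  mapa_estudiantes.foldl (fun total sp =>
    let exams := (List.lookup sp.1 mapa_estudiantes).getD []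
    let st : PySem.Set Int := exams.foldl (fun st e =>
      if (List.lookup e sol).isSome then PySem.Set.add st (pvSlot sol e) else st) PySem.Set.empty
    total + (st.countP (fun v => decide ((v + 1) ∈ st)) : Int)) 0

-- ===== PRECONDITION & SPEC =====
-- Pre_ excludes exactly the inputs on which Python A raises IndexError: some student's exam
-- is present in sol with an empty slot list, so sol[e][0] fails.
def Pre_penalizacion_consecutivos (sol : List (String × List Int)) (mapa_estudiantes : List (String × List String)) : Prop :=
  ∀ p ∈ mapa_estudiantes, ∀ e ∈ p.2, List.lookup e sol ≠ some ([] : List Int)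
instance (sol : List (String × List Int)) (mapa_estudiantes : List (String × List String)) : Decidable (Pre_penalizacion_consecutivos sol mapa_estudiantes) := by unfold Pre_penalizacion_consecutivos; infer_instance

def pvWitness_penalizacion_consecutivos : (List (String × List Int)) × (List (String × List String)) :=
  ([("E1", [1]), ("E2", [2]), ("E3", [5])], [("ana", ["E1", "E2", "E3"]), ("bob", ["E2", "EX"])])

def Spec_penalizacion_consecutivos (sol : List (String × List Int)) (mapa_estudiantes : List (String × List String)) (out : Int) : Prop := out = penalizacion_consecutivos_alt sol mapa_estudiantes
instance (sol : List (String × List Int)) (mapa_estudiantes : List (String × List String)) (out : Int) : Decidable (Spec_penalizacion_consecutivos sol mapa_estudiantes out) := by unfold Spec_penalizacion_consecutivos; infer_instance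

-- ===== CLAIM (what is proved, stated in full; the proofs are below) =====
def Claim_equal_penalizacion_consecutivos : Prop := ∀ (sol : List (String × List Int)) (mapa_estudiantes : List (String × List String)), Dom_penalizacion_consecutivos sol mapa_estudiantes → Pre_penalizacion_consecutivos sol mapa_estudiantes → Spec_penalizacion_consecutivos sol mapa_estudiantes (penalizacion_consecutivos sol mapa_estudiantes)

-- ===== LEMMAS AND PROOFS =====

-- structural count of adjacent consecutive pairs in a list
def pvAdj : List Int → Nat
  | [] => 0
  | [_] => 0
  | a :: b :: t => (if b = a + 1 then 1 else 0) + pvAdj (b :: t)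

-- A's index loop over range(len-1) counts exactly the adjacent consecutive pairs
theorem pvAdj_range (s : List Int) :
    (List.range (s.length - 1)).countP
      (fun i => decide (s[i + 1]?.getD 0 = s[i]?.getD 0 + 1)) = pvAdj s := by
  induction s with
  | nil => simp [pvAdj]
  | cons a t ih =>
    cases t with
    | nil => simp [pvAdj]
    | cons b u =>
      have hlen : (a :: b :: u).length - 1 = u.length + 1 := by simp
      rw [hlen, List.range_succ_eq_map, List.countP_cons, List.countP_map]
      have h1 : (List.range u.length).countP
          ((fun i => decide ((a :: b :: u)[i + 1]?.getD 0 = (a :: b :: u)[i]?.getD 0 + 1)) ∘ Nat.succ)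
          = (List.range u.length).countP
          (fun i => decide ((b :: u)[i + 1]?.getD 0 = (b :: u)[i]?.getD 0 + 1)) := by
        apply List.countP_congr
        intro i _
        simp
      have h2 : (List.range ((b :: u).length - 1)).countP
          (fun i => decide ((b :: u)[i + 1]?.getD 0 = (b :: u)[i]?.getD 0 + 1))
          = (List.range u.length).countP
          (fun i => decide ((b :: u)[i + 1]?.getD 0 = (b :: u)[i]?.getD 0 + 1)) := by
        simp
      rw [h1, ← h2, ih]
      simp only [pvAdj]
      by_cases hc : b = a + 1 <;> simp [hc, Nat.add_comm]

-- on a sorted list, adjacent-pair count = number of distinct v with v+1 present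
theorem pvAdj_sorted_count (s : List Int) (hs : s.Pairwise (· ≤ ·)) :
    pvAdj s = (PySem.Set.ofList s).countP (fun v => decide ((v + 1) ∈ s)) := by
  induction s with
  | nil => simp [pvAdj]
  | cons a t ih =>
    cases t with
    | nil => simp [pvAdj, PySem.Set.ofList]
    | cons b u =>
      have hab : a ≤ b := (List.pairwise_cons.mp hs).1 b (by simp)
      have htail : (b :: u).Pairwise (· ≤ ·) := (List.pairwise_cons.mp hs).2
      have hb_le : ∀ x ∈ b :: u, b ≤ x := by
        intro x hx
        rcases List.mem_cons.mp hx with h | h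
        · omega
        · exact (List.pairwise_cons.mp htail).1 x h
      rw [PySem.Set.ofList_cons]
      rcases eq_or_lt_of_le hab with heq | hlt
      · -- a = b : the head is a duplicate; counted set unchanged
        subst heq
        have hperm : (a :: PySem.Set.discard (PySem.Set.ofList (a :: u)) a).Perm
            (PySem.Set.ofList (a :: u)) := by
          refine (List.perm_ext_iff_of_nodup ?_ (PySem.Set.nodup_ofList _)).mpr ?_
          · exact List.nodup_cons.mpr
              ⟨fun h => ((PySem.Set.mem_discard _ _ _).mp h).2 rfl,
               PySem.Set.nodup_discard _ _ (PySem.Set.nodup_ofList _)⟩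
          · intro x
            simp only [List.mem_cons, PySem.Set.mem_discard]
            constructor
            · rintro (rfl | ⟨h, _⟩)
              · exact (PySem.Set.mem_ofList _ _).mpr (by simp)
              · exact h
            · intro hx
              by_cases hxa : x = a
              · exact Or.inl hxa
              · exact Or.inr ⟨hx, hxa⟩
        rw [List.Perm.countP_eq _ hperm]
        have hA : pvAdj (a :: a :: u) = pvAdj (a :: u) := by
          simp only [pvAdj, if_neg (by omega : ¬ a = a + 1), Nat.zero_add]
        rw [hA, ih htail]
        apply List.countP_congr
        intro v hv
        have hva : v ∈ a :: u := (PySem.Set.mem_ofList _ _).mp hv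
        simp only [decide_eq_true_eq, List.mem_cons]
        tauto
      · -- a < b : a is fresh; everything in b :: u is > a
        have hfresh : a ∉ PySem.Set.ofList (b :: u) := by
          intro h
          have := hb_le a ((PySem.Set.mem_ofList _ _).mp h)
          omega
        have hdis : PySem.Set.discard (PySem.Set.ofList (b :: u)) a
            = PySem.Set.ofList (b :: u) := by
          show (PySem.Set.ofList (b :: u)).filter (fun y => !y == a) = PySem.Set.ofList (b :: u)
          apply List.filter_eq_self.mpr
          intro x hx
          simp only [Bool.not_eq_true', beq_eq_false_iff_ne, ne_eq]
          intro h; subst h; exact hfresh hx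
        have hstep : pvAdj (a :: b :: u) = (if b = a + 1 then 1 else 0) + pvAdj (b :: u) := rfl
        rw [hstep, ih htail, List.countP_cons, hdis]
        have hheadP : decide ((a + 1) ∈ a :: b :: u) = (if b = a + 1 then true else false) := by
          by_cases hc : b = a + 1
          · simp [hc]
          · simp only [hc, if_false]
            apply decide_eq_false
            simp only [List.mem_cons]
            rintro (h | h | h)
            · omega
            · omega
            · have := hb_le (a + 1) (by simp [h]); omega
        have hcongr : (PySem.Set.ofList (b :: u)).countP (fun v => decide ((v + 1) ∈ b :: u))
            = (PySem.Set.ofList (b :: u)).countP (fun v => decide ((v + 1) ∈ a :: b :: u)) := by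
          apply List.countP_congr
          intro v hv
          have hvb : b ≤ v := hb_le v ((PySem.Set.mem_ofList _ _).mp hv)
          simp only [decide_eq_true_eq, List.mem_cons]
          constructor
          · intro h; exact Or.inr h
          · rintro (h | h)
            · omega
            · exact h
        rw [← hcongr, hheadP]
        by_cases hc : b = a + 1 <;> simp [hc, Nat.add_comm]

-- per-student agreement: A's sort-and-scan equals B's set count on the same slot list
theorem pvStudent (p : Int) (slots : List Int) :
    (PySem.List.pyRange 0 (((PySem.List.sorted slots (fun x => x) false).length : Int) - 1) 1).foldl
      (fun p i =>
        if (PySem.List.pyGet? (PySem.List.sorted slots (fun x => x) false) (i + 1)).getD 0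
            = (PySem.List.pyGet? (PySem.List.sorted slots (fun x => x) false) i).getD 0 + 1
        then p + 1 else p) p
    = p + ((PySem.Set.ofList slots).countP
        (fun v => decide ((v + 1) ∈ PySem.Set.ofList slots)) : Int) := by
  set s := PySem.List.sorted slots (fun x => x) false with hsdef
  have hperm : s.Perm slots := PySem.List.sorted_perm slots (fun x => x) false
  have hrange : PySem.List.pyRange 0 ((s.length : Int) - 1) 1
      = List.map (Nat.cast : Nat → Int) (List.range (s.length - 1)) := by
    cases hn : s.length with
    | zero => simp
    | succ m =>
      have h1 : (((m + 1 : Nat) : Int) - 1) = ((m : Nat) : Int) := by push_cast; ring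
      rw [h1, PySem.List.pyRange_zero_natCast]
      simp
  rw [hrange]
  rw [List.foldl_map]
  rw [PySem.List.foldl_ite_add_one]
  congr 1
  have hcnt : (List.range (s.length - 1)).countP
      (fun (k : Nat) => decide ((PySem.List.pyGet? s ((k : Int) + 1)).getD 0 = (PySem.List.pyGet? s (k : Int)).getD 0 + 1))
      = (List.range (s.length - 1)).countP
      (fun i => decide (s[i + 1]?.getD 0 = s[i]?.getD 0 + 1)) := by
    apply List.countP_congr
    intro k _
    have h1 : ((k : Int) + 1) = (((k + 1 : Nat)) : Int) := by push_cast; ring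
    rw [h1, PySem.List.pyGet?_natCast, PySem.List.pyGet?_natCast]
  rw [hcnt, pvAdj_range,
      pvAdj_sorted_count s (by simpa using PySem.List.sorted_pairwise slots (fun x => x))]
  have hmemiff : ∀ x : Int, x ∈ s ↔ x ∈ slots := fun x => hperm.mem_iff
  have hsetperm : (PySem.Set.ofList s).Perm (PySem.Set.ofList slots) := by
    refine (List.perm_ext_iff_of_nodup (PySem.Set.nodup_ofList _) (PySem.Set.nodup_ofList _)).mpr ?_
    intro x
    simp only [PySem.Set.mem_ofList]
    exact hmemiff x
  norm_cast
  rw [List.Perm.countP_eq _ hsetperm]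
  apply List.countP_congr
  intro v hv
  simp only [decide_eq_true_eq, PySem.Set.mem_ofList]
  exact hmemiff (v + 1)

-- B's set-building fold is Set.ofList of A's slot list
theorem pvSetBuild (sol : List (String × List Int)) (exams : List String) :
    exams.foldl (fun st e =>
      if (List.lookup e sol).isSome then PySem.Set.add st (pvSlot sol e) else st) PySem.Set.empty
    = PySem.Set.ofList (exams.foldl (fun slots e =>
      if (List.lookup e sol).isSome then slots ++ [pvSlot sol e] else slots) []) := by
  rw [PySem.List.foldl_append_if (fun e => (List.lookup e sol).isSome) (pvSlot sol) exams []]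
  rw [PySem.List.foldl_if_eq_foldl_filter (fun e => (List.lookup e sol).isSome)
    (fun st e => PySem.Set.add st (pvSlot sol e)) exams PySem.Set.empty]
  rw [← PySem.Set.update_map_eq_foldl_add]
  simpa using PySem.Set.update_nil_left
    ((exams.filter (fun e => (List.lookup e sol).isSome)).map (pvSlot sol))

-- ===== VERDICT (by name: the statement is the Claim_ definition above) =====
theorem penalizacion_consecutivos_spec : Claim_equal_penalizacion_consecutivos := by
  intro sol mapa _ _
  unfold Spec_penalizacion_consecutivos penalizacion_consecutivos penalizacion_consecutivos_alt
  apply PySem.List.foldl_congr_mem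
  intro acc sp _
  simp only
  rw [pvSetBuild sol ((List.lookup sp.1 mapa).getD [])]
  exact pvStudent acc _
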